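-- pv_equiv track=rewrite | github.com/Lightblues/Leetcode | LC-contest/d051-100/d58.py | minSpaceWastedKResizing
-- ===== SOURCE A (Python) =====
-- from typing import List, Optional, Tuple
-- from itertools import product, permutations, combinations, combinations_with_replacement, accumulate
--
-- def minSpaceWastedKResizing(nums: List[int], k: int) -> int:
--     n = len(nums)
--     # g[i][j] 表示 nums[i:j] 作为一个组需要多少代价
--     g = [[0] * n for _ in range(n)]
--     acc = list(accumulate(nums, initial=0))
--     for i in range(n):
--         mx = nums[i]
--         for j in range(i, n):
--             mx = max(mx, nums[j])
--             g[i][j] = mx * (j-i+1) - (acc[j+1] - acc[i])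
--     # 初始化: 只有一个组 (k=0)
--     dp = g[0][:]
--     # 遍历 k = 1...k
--     for _ in range(1, k+1):
--         new = dp[:]
--         # update dp[i]
--         for i in range(n):
--             # dp[i][j] = min_ii { dp[ii][j] + g[ii+1][i] } 遍历 ii=0...i-1 尝试对于 nums[:i+1] 进行分割
--             # 这里将 j维度省略.
--             for ii in range(i):
--                 new[i] = min(new[i], dp[ii] + g[ii+1][i])
--         dp = new
--     return dp[-1]
-- ===== SOURCE B (Python) =====
-- from typing import List
--
-- def minSpaceWastedKResizing(nums: List[int], k: int) -> int:
--     # Top-down memoized recursion over (prefix end, resizings left), no g table: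
--     # segment cost computed on the fly from prefix sums and a running max.
--     n = len(nums)
--     pre = [0]
--     for v in nums:
--         pre.append(pre[-1] + v)
--     memo = {}
--
--     def dfs(i, r):
--         # minimal waste for nums[:i+1] using at most r resizings
--         if r <= 0:
--             return max(nums[:i+1]) * (i + 1) - pre[i + 1]
--         if (i, r) in memo:
--             return memo[(i, r)]
--         best = None
--         mx = nums[i]
--         for s in range(i, -1, -1):
--             mx = max(mx, nums[s])
--             cand = (dfs(s - 1, r - 1) if s > 0 else 0) + mx * (i - s + 1) - (pre[i + 1] - pre[s])
--             if best is None or cand < best: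
--                 best = cand
--         memo[(i, r)] = best
--         return best
--
--     # more than n-1 resizings never helps
--     return dfs(n - 1, min(k, n - 1))
-- ===== Notes on version B (the rewrite author's own statement) =====
-- stated objective: alternative
-- what changed: Replaced A's precomputed n-by-n cost table plus k bottom-up DP sweeps (each relaxing every prefix against every split point) by a top-down memoized recursion dfs(i, r) over (prefix end, resizings left) clamped at n-1, with segment costs computed on the fly from prefix sums and a running max.
import Mathlib
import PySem

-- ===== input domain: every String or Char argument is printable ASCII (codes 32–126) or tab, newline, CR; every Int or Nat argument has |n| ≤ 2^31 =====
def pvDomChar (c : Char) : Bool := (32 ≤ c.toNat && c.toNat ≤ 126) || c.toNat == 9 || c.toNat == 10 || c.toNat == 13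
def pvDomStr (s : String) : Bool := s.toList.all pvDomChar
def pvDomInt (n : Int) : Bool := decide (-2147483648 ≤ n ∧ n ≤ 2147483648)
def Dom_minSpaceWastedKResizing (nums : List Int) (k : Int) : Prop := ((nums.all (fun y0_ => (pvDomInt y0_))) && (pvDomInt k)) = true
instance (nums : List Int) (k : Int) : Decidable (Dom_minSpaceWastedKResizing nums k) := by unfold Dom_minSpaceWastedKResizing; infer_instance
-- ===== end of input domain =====

-- B replaces A's g-table + k layered bottom-up sweeps by a top-down recursion over
-- (prefix end, resizings left) clamped at n-1, costs computed from prefix sums and a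
-- running max (objective: alternative decomposition).

-- ===== PORT A =====
-- port of itertools.accumulate(nums, initial=0): running sums starting from 0
def pvAccA (s : Int) : List Int → List Int
  | [] => [s]
  | x :: xs => s :: pvAccA (s + x) xs

def minSpaceWastedKResizing (nums : List Int) (k : Int) : Int :=
  let n := nums.length
  let g0 : List (List Int) := List.replicate n (List.replicate n (0 : Int))
  let acc := pvAccA 0 nums
  -- indices produced by the ranges are nonnegative and in range, so getD is exact
  let g := (List.range n).foldl (fun (g : List (List Int)) (i : Nat) =>
      ((PySem.List.pyRange (i : Int) (n : Int) 1).foldl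
        (fun (p : List (List Int) × Int) jI =>
          let j := jI.toNat
          let mx := max p.2 (nums.getD j 0)
          (p.1.set i ((p.1.getD i []).set j
              (mx * ((j : Int) - (i : Int) + 1) - (acc.getD (j + 1) 0 - acc.getD i 0))), mx))
        (g, nums.getD i 0)).1) g0
  let dp := g.getD 0 []
  let dp := (PySem.List.pyRange 1 (k + 1) 1).foldl (fun dp _ =>
      (List.range n).foldl (fun (new : List Int) (i : Nat) =>
        (List.range i).foldl (fun (new : List Int) (ii : Nat) =>
          new.set i (min (new.getD i 0) (dp.getD ii 0 + (g.getD (ii + 1) []).getD i 0))) new) dp) dp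
  (PySem.List.pyGet? dp (-1)).getD 0

-- ===== PORT B =====
-- port of Source B: pre = running prefix sums starting from [0]
def pvPreB (s : Int) : List Int → List Int
  | [] => [s]
  | x :: xs => s :: pvPreB (s + x) xs

-- the descending 's' loop of dfs; f is dfs at level r-1, best is the running minimum
def pvGoB (nums pre : List Int) (f : Nat → Int) (i : Nat) : Nat → Int → Option Int → Int
  | 0, mx, best =>
      let mx' := max mx (nums.getD 0 0)
      let cand := 0 + mx' * ((i : Int) - 0 + 1) - (pre.getD (i + 1) 0 - pre.getD 0 0)
      match best with
      | none => cand
      | some b => min b cand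
  | s + 1, mx, best =>
      let mx' := max mx (nums.getD (s + 1) 0)
      let cand := f s + mx' * ((i : Int) - ((s : Int) + 1) + 1) - (pre.getD (i + 1) 0 - pre.getD (s + 1) 0)
      pvGoB nums pre f i s mx' (some (match best with
        | none => cand
        | some b => min b cand))

-- dfs(i, r): minimal waste for nums[:i+1] using at most r resizings
def pvDfsB (nums pre : List Int) : Nat → Nat → Int
  | i, 0 => ((PySem.List.max? (nums.take (i + 1)) (fun x => x)).getD 0) * ((i : Int) + 1) - pre.getD (i + 1) 0
  | i, r + 1 => pvGoB nums pre (fun j => pvDfsB nums pre j r) i i (nums.getD i 0) none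

def minSpaceWastedKResizing_alt (nums : List Int) (k : Int) : Int :=
  let n := nums.length
  let pre := pvPreB 0 nums
  pvDfsB nums pre (n - 1) (min k ((n : Int) - 1)).toNat

-- ===== PRECONDITION & SPEC =====
-- Pre_ excludes only the empty list, on which A raises IndexError (dp[-1] of []).
def Pre_minSpaceWastedKResizing (nums : List Int) (k : Int) : Prop := nums ≠ []
instance (nums : List Int) (k : Int) : Decidable (Pre_minSpaceWastedKResizing nums k) := by unfold Pre_minSpaceWastedKResizing; infer_instance

def pvWitness_minSpaceWastedKResizing : List Int × Int := ([10, 20, 15, 30, 20], 2)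

def Spec_minSpaceWastedKResizing (nums : List Int) (k : Int) (out : Int) : Prop := out = minSpaceWastedKResizing_alt nums k
instance (nums : List Int) (k : Int) (out : Int) : Decidable (Spec_minSpaceWastedKResizing nums k out) := by unfold Spec_minSpaceWastedKResizing; infer_instance

-- ===== CLAIM (what is proved, stated in full; the proofs are below) =====
def Claim_equal_minSpaceWastedKResizing : Prop := ∀ (nums : List Int) (k : Int), Dom_minSpaceWastedKResizing nums k → Pre_minSpaceWastedKResizing nums k → Spec_minSpaceWastedKResizing nums k (minSpaceWastedKResizing nums k)

-- ===== LEMMAS AND PROOFS =====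

-- sum of the first m elements
def pvS (nums : List Int) (m : Nat) : Int := (nums.take m).sum
-- max of nums[s..i] (via indices; exact for s ≤ i < nums.length)
def pvSegMax (nums : List Int) (s i : Nat) : Int :=
  (List.range' s (i + 1 - s)).foldl (fun v t => max v (nums.getD t 0)) (nums.getD s 0)
-- cost of the group nums[s..i]
def pvG (nums : List Int) (s i : Nat) : Int :=
  pvSegMax nums s i * ((i : Int) - (s : Int) + 1) - (pvS nums (i + 1) - pvS nums s)

-- A's dp recurrence, functionally
def pvFA (nums : List Int) : Nat → Nat → Int
  | 0, i => pvG nums 0 i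
  | t + 1, i => (List.range i).foldl (fun v ii => min v (pvFA nums t ii + pvG nums (ii + 1) i)) (pvFA nums t i)

-- running minimum of cand 0 .. cand s
def pvMB (cand : Nat → Int) : Nat → Int
  | 0 => cand 0
  | s + 1 => min (pvMB cand s) (cand (s + 1))

-- min-fold helpers
theorem pv_foldl_min_min {α : Type} (f : α → Int) (l : List α) (a b : Int) :
    l.foldl (fun v x => min v (f x)) (min a b) = min a (l.foldl (fun v x => min v (f x)) b) := by
  induction l generalizing a b with
  | nil => simp
  | cons x xs ih =>
    simp only [List.foldl_cons]
    rw [min_assoc, ih]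

theorem pv_foldl_min_le {α : Type} (f : α → Int) (l : List α) (a : Int) :
    l.foldl (fun v x => min v (f x)) a ≤ a := by
  induction l generalizing a with
  | nil => simp
  | cons x xs ih =>
    simp only [List.foldl_cons]
    exact le_trans (ih _) (min_le_left _ _)

theorem pv_foldl_min_mono {α : Type} (f g : α → Int) (l : List α) (a b : Int)
    (hab : a ≤ b) (h : ∀ x ∈ l, f x ≤ g x) :
    l.foldl (fun v x => min v (f x)) a ≤ l.foldl (fun v x => min v (g x)) b := by
  induction l generalizing a b with
  | nil => simpa
  | cons x xs ih =>
    simp only [List.foldl_cons]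
    exact ih _ _ (min_le_min hab (h x (List.mem_cons_self))) (fun y hy => h y (List.mem_cons_of_mem _ hy))

theorem pv_foldl_min_absorb {α : Type} (f g : α → Int) (l : List α) (a : Int)
    (h : ∀ x ∈ l, f x ≤ g x) :
    l.foldl (fun v x => min v (f x)) (l.foldl (fun v x => min v (g x)) a)
      = l.foldl (fun v x => min v (f x)) a := by
  induction l generalizing a with
  | nil => simp
  | cons x xs ih =>
    simp only [List.foldl_cons]
    have h1 : ∀ y ∈ xs, f y ≤ g y := fun y hy => h y (List.mem_cons_of_mem _ hy)
    have hfx : f x ≤ g x := h x List.mem_cons_self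
    rw [min_comm _ (f x), pv_foldl_min_min, ih _ h1, min_comm a (g x), pv_foldl_min_min,
        min_comm a (f x), pv_foldl_min_min, ← min_assoc, min_eq_left hfx]

-- max-fold seed lemma
theorem pv_foldl_max_min {α : Type} (f : α → Int) (l : List α) (a b : Int) :
    l.foldl (fun v x => max v (f x)) (max a b) = max a (l.foldl (fun v x => max v (f x)) b) := by
  induction l generalizing a b with
  | nil => simp
  | cons x xs ih =>
    simp only [List.foldl_cons]
    rw [max_assoc, ih]

-- prefix sums
theorem pvAccA_getD (s : Int) (nums : List Int) (m : Nat) (hm : m ≤ nums.length) :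
    (pvAccA s nums).getD m 0 = s + pvS nums m := by
  induction nums generalizing s m with
  | nil =>
    have : m = 0 := by simpa using hm
    subst this
    simp [pvAccA, pvS]
  | cons x xs ih =>
    cases m with
    | zero => simp [pvAccA, pvS]
    | succ m =>
      simp only [pvAccA, List.getD_cons_succ]
      rw [ih (s + x) m (by simpa using hm)]
      simp [pvS, List.take_succ_cons]
      ring

theorem pvPreB_eq_pvAccA (s : Int) (nums : List Int) : pvPreB s nums = pvAccA s nums := by
  induction nums generalizing s with
  | nil => rfl
  | cons x xs ih => simp [pvPreB, pvAccA, ih]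

-- segMax recurrences
theorem pvSegMax_self (nums : List Int) (i : Nat) : pvSegMax nums i i = nums.getD i 0 := by
  simp [pvSegMax]

theorem pvSegMax_snoc (nums : List Int) (s j : Nat) (h : s ≤ j) :
    pvSegMax nums s (j + 1) = max (pvSegMax nums s j) (nums.getD (j + 1) 0) := by
  unfold pvSegMax
  have h1 : j + 1 + 1 - s = (j + 1 - s) + 1 := by omega
  have h2 : s + (j + 1 - s) = j + 1 := by omega
  rw [h1, List.range'_1_concat, List.foldl_append, h2]
  simp

theorem pvSegMax_cons (nums : List Int) (s i : Nat) (h : s < i) :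
    pvSegMax nums s i = max (nums.getD s 0) (pvSegMax nums (s + 1) i) := by
  unfold pvSegMax
  have h1 : i + 1 - s = (i - s) + 1 := by omega
  have h2 : i - s = (i - (s + 1)) + 1 := by omega
  have h3 : i + 1 - (s + 1) = (i - (s + 1)) + 1 := by omega
  rw [h1, List.range'_succ, List.foldl_cons, h2, List.range'_succ, List.foldl_cons,
      h3, List.range'_succ, List.foldl_cons]
  simp only [max_self]
  have := pv_foldl_max_min (fun t => nums.getD t 0) (List.range' (s + 1 + 1) (i - (s + 1))) (nums.getD s 0) (nums.getD (s + 1) 0)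
  simpa using this

-- element-fold vs index-fold for the running max
theorem pv_foldl_idx_max (nums : List Int) (c : Nat) : ∀ (s : Nat) (a : Int), s + c ≤ nums.length →
    (List.range' s c).foldl (fun v t => max v (nums.getD t 0)) a = ((nums.drop s).take c).foldl max a := by
  induction c with
  | zero => simp
  | succ c ih =>
    intro s a h
    have hs : s < nums.length := by omega
    rw [List.range'_succ, List.foldl_cons]
    rw [List.drop_eq_getElem_cons hs]
    simp only [List.take_succ_cons, List.foldl_cons]
    rw [ih (s + 1) _ (by omega)]
    congr 1
    rw [List.getD_eq_getElem _ _ hs]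

-- candidate value for a last group starting at s' (f = dfs at the previous level)
def pvCand (nums : List Int) (f : Nat → Int) (i : Nat) : Nat → Int
  | 0 => pvG nums 0 i
  | s + 1 => f s + pvG nums (s + 1) i

theorem pvMB_eq_fold (cand : Nat → Int) (s : Nat) :
    pvMB cand s = (List.range s).foldl (fun v ii => min v (cand (ii + 1))) (cand 0) := by
  induction s with
  | zero => simp [pvMB]
  | succ s ih =>
    rw [List.range_succ, List.foldl_append, ← ih]
    simp [pvMB]

-- the descending loop computes the running minimum of all candidates
theorem pvGoB_spec (nums pre : List Int) (f : Nat → Int) (i : Nat)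
    (hpre : ∀ m, m ≤ nums.length → pre.getD m 0 = pvS nums m) (hi : i < nums.length) :
    ∀ (s : Nat) (mx : Int) (best : Option Int), s ≤ i →
      max mx (nums.getD s 0) = pvSegMax nums s i →
      pvGoB nums pre f i s mx best
        = (match best with
           | none => pvMB (pvCand nums f i) s
           | some b => min b (pvMB (pvCand nums f i) s)) := by
  intro s
  induction s with
  | zero =>
    intro mx best _ hmx
    have hG : (0 : Int) + pvSegMax nums 0 i * ((i : Int) - 0 + 1) - (pre.getD (i + 1) 0 - pre.getD 0 0)
        = pvG nums 0 i := by
      rw [hpre (i + 1) (by omega), hpre 0 (by omega)]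
      simp [pvG, pvS]
    cases best with
    | none => simp only [pvGoB, hmx, pvMB, pvCand]; exact hG
    | some b => simp only [pvGoB, hmx, pvMB, pvCand, hG]
  | succ s ih =>
    intro mx best hs hmx
    have hlt : s < i := by omega
    have hmx' : max (pvSegMax nums (s + 1) i) (nums.getD s 0) = pvSegMax nums s i := by
      rw [pvSegMax_cons nums s i hlt, max_comm]
    have hC : f s + pvSegMax nums (s + 1) i * ((i : Int) - ((s : Int) + 1) + 1)
        - (pre.getD (i + 1) 0 - pre.getD (s + 1) 0) = pvCand nums f i (s + 1) := by
      rw [hpre (i + 1) (by omega), hpre (s + 1) (by omega)]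
      simp only [pvCand, pvG]
      push_cast
      ring
    cases best with
    | none =>
      simp only [pvGoB, hmx]
      rw [ih _ _ (by omega) hmx']
      simp only [hC, pvMB]
      rw [min_comm]
    | some b =>
      simp only [pvGoB, hmx]
      rw [ih _ _ (by omega) hmx']
      simp only [hC, pvMB]
      rw [min_assoc, min_comm (pvCand nums f i (s + 1)) _]

theorem pvDfsB_zero (nums pre : List Int) (i : Nat)
    (hpre : ∀ m, m ≤ nums.length → pre.getD m 0 = pvS nums m) (hi : i < nums.length) :
    pvDfsB nums pre i 0 = pvG nums 0 i := by
  have hmax : (PySem.List.max? (nums.take (i + 1)) (fun x => x)).getD 0 = pvSegMax nums 0 i := by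
    cases nums with
    | nil => simp at hi
    | cons x xs =>
      rw [List.take_succ_cons, PySem.List.max?_id_cons]
      have : pvSegMax (x :: xs) 0 i
          = (((x :: xs).drop 0).take (i + 1)).foldl max ((x :: xs).getD 0 0) := by
        unfold pvSegMax
        exact pv_foldl_idx_max (x :: xs) (i + 1 - 0) 0 _ (by simpa using hi)
      simp only [List.drop_zero, List.take_succ_cons, List.getD_cons_zero, List.foldl_cons,
        max_self] at this
      rw [this]
      simp
  simp only [pvDfsB, hmax, pvG]
  rw [hpre (i + 1) (by omega)]
  have h0 : pvS nums 0 = 0 := by simp [pvS]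
  rw [h0]
  push_cast
  ring

theorem pvDfsB_succ (nums pre : List Int) (i r : Nat)
    (hpre : ∀ m, m ≤ nums.length → pre.getD m 0 = pvS nums m) (hi : i < nums.length) :
    pvDfsB nums pre i (r + 1)
      = (List.range i).foldl (fun v ii => min v (pvDfsB nums pre ii r + pvG nums (ii + 1) i)) (pvG nums 0 i) := by
  have h := pvGoB_spec nums pre (fun j => pvDfsB nums pre j r) i hpre hi i (nums.getD i 0) none
    (le_refl i) (by rw [max_self, pvSegMax_self])
  simp only [pvDfsB, h, pvMB_eq_fold]
  rfl

theorem pvDfsB_mono (nums pre : List Int)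
    (hpre : ∀ m, m ≤ nums.length → pre.getD m 0 = pvS nums m) :
    ∀ (r i : Nat), i < nums.length → pvDfsB nums pre i (r + 1) ≤ pvDfsB nums pre i r := by
  intro r
  induction r with
  | zero =>
    intro i hi
    rw [pvDfsB_succ nums pre i 0 hpre hi, pvDfsB_zero nums pre i hpre hi]
    exact pv_foldl_min_le _ _ _
  | succ r ih =>
    intro i hi
    rw [pvDfsB_succ nums pre i (r + 1) hpre hi, pvDfsB_succ nums pre i r hpre hi]
    refine pv_foldl_min_mono _ _ _ _ _ (le_refl _) ?_
    intro ii hii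
    have : ii < nums.length := by
      have := List.mem_range.mp hii; omega
    exact add_le_add (ih ii this) (le_refl _)

theorem pvFA_eq_pvDfsB (nums pre : List Int)
    (hpre : ∀ m, m ≤ nums.length → pre.getD m 0 = pvS nums m) :
    ∀ (t i : Nat), i < nums.length → pvFA nums t i = pvDfsB nums pre i t := by
  intro t
  induction t with
  | zero =>
    intro i hi
    rw [pvFA, pvDfsB_zero nums pre i hpre hi]
  | succ t ih =>
    intro i hi
    have hmem : ∀ ii ∈ List.range i, ii < nums.length := by
      intro ii hii
      have := List.mem_range.mp hii; omega
    rw [pvFA, pvDfsB_succ nums pre i t hpre hi]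
    rw [PySem.List.foldl_congr_mem (List.range i)
      (fun v ii => min v (pvFA nums t ii + pvG nums (ii + 1) i))
      (fun v ii => min v (pvDfsB nums pre ii t + pvG nums (ii + 1) i))
      (pvFA nums t i)
      (by intro acc x hx; simp only []; rw [ih x (hmem x hx)])]
    rw [ih i hi]
    cases t with
    | zero =>
      rw [pvDfsB_zero nums pre i hpre hi]
    | succ r =>
      rw [pvDfsB_succ nums pre i r hpre hi]
      exact pv_foldl_min_absorb _ _ _ _ (fun ii hii => add_le_add (pvDfsB_mono nums pre hpre r ii (hmem ii hii)) (le_refl _))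

theorem pvDfsB_stab_succ (nums pre : List Int)
    (hpre : ∀ m, m ≤ nums.length → pre.getD m 0 = pvS nums m) :
    ∀ (i : Nat), i < nums.length → ∀ (t : Nat), i ≤ t → pvDfsB nums pre i (t + 1) = pvDfsB nums pre i t := by
  intro i
  induction i using Nat.strong_induction_on with
  | _ i ihs =>
    intro hi t ht
    cases t with
    | zero =>
      have hi0 : i = 0 := by omega
      subst hi0
      rw [pvDfsB_succ nums pre 0 0 hpre hi, pvDfsB_zero nums pre 0 hpre hi]
      simp
    | succ r =>
      rw [pvDfsB_succ nums pre i (r + 1) hpre hi, pvDfsB_succ nums pre i r hpre hi]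
      refine PySem.List.foldl_congr_mem _ _ _ _ ?_
      intro acc ii hii
      have hlt : ii < i := List.mem_range.mp hii
      have : pvDfsB nums pre ii (r + 1) = pvDfsB nums pre ii r := ihs ii hlt (by omega) r (by omega)
      rw [this]

theorem pvDfsB_stab (nums pre : List Int)
    (hpre : ∀ m, m ≤ nums.length → pre.getD m 0 = pvS nums m) :
    ∀ (i : Nat), i < nums.length → ∀ (t : Nat), i ≤ t → pvDfsB nums pre i t = pvDfsB nums pre i i := by
  intro i hi t ht
  induction t, ht using Nat.le_induction with
  | base => rfl
  | succ t ht ih => rw [pvDfsB_stab_succ nums pre hpre i hi t ht, ih]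

-- ===== A-side characterisation =====

theorem pv_getD_set_self {α : Type} (l : List α) (i : Nat) (a d : α) (h : i < l.length) :
    (l.set i a).getD i d = a := by
  rw [List.getD_eq_getElem?_getD, List.getElem?_set_self h]; rfl

theorem pv_getD_set_ne {α : Type} (l : List α) (i j : Nat) (a d : α) (h : i ≠ j) :
    (l.set i a).getD j d = l.getD j d := by
  rw [List.getD_eq_getElem?_getD, List.getElem?_set_ne h, ← List.getD_eq_getElem?_getD]

-- one step of A's inner row-building loop
def pvStepA (nums acc : List Int) (i : Nat) (p : List (List Int) × Int) (jI : Int) : List (List Int) × Int :=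
  let j := jI.toNat
  let mx := max p.2 (nums.getD j 0)
  (p.1.set i ((p.1.getD i []).set j
      (mx * ((j : Int) - (i : Int) + 1) - (acc.getD (j + 1) 0 - acc.getD i 0))), mx)

theorem pvRow_inv (nums : List Int) (i : Nat) (hi : i < nums.length) :
    ∀ (c : Nat), c ≤ nums.length - i → ∀ (g : List (List Int)),
      g.length = nums.length → (g.getD i []).length = nums.length →
      (((List.range c).foldl (fun (p : List (List Int) × Int) (k : Nat) => pvStepA nums (pvAccA 0 nums) i p ((i : Int) + (k : Int))) (g, nums.getD i 0)).1.length = nums.length)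
      ∧ ((((List.range c).foldl (fun (p : List (List Int) × Int) (k : Nat) => pvStepA nums (pvAccA 0 nums) i p ((i : Int) + (k : Int))) (g, nums.getD i 0)).1.getD i []).length = nums.length)
      ∧ (∀ i', i' ≠ i → ((List.range c).foldl (fun (p : List (List Int) × Int) (k : Nat) => pvStepA nums (pvAccA 0 nums) i p ((i : Int) + (k : Int))) (g, nums.getD i 0)).1.getD i' [] = g.getD i' [])
      ∧ (∀ j, (((List.range c).foldl (fun (p : List (List Int) × Int) (k : Nat) => pvStepA nums (pvAccA 0 nums) i p ((i : Int) + (k : Int))) (g, nums.getD i 0)).1.getD i []).getD j 0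
            = if i ≤ j ∧ j < i + c then pvG nums i j else (g.getD i []).getD j 0)
      ∧ (((List.range c).foldl (fun (p : List (List Int) × Int) (k : Nat) => pvStepA nums (pvAccA 0 nums) i p ((i : Int) + (k : Int))) (g, nums.getD i 0)).2
            = if c = 0 then nums.getD i 0 else pvSegMax nums i (i + c - 1)) := by
  intro c
  induction c with
  | zero =>
    intro _ g hg hrow
    simp only [List.range_zero, List.foldl_nil]
    refine ⟨hg, hrow, ?_, fun j => ?_, ?_⟩
    · intro _ _; trivial
    · rw [if_neg (by omega)]
    · norm_num
  | succ c ih =>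
    intro hc g hg hrow
    obtain ⟨ih1, ih2, ih3, ih4, ih5⟩ := ih (by omega) g hg hrow
    set F := (List.range c).foldl (fun (p : List (List Int) × Int) (k : Nat) => pvStepA nums (pvAccA 0 nums) i p ((i : Int) + (k : Int))) (g, nums.getD i 0) with hF
    have hj : i + c < nums.length := by omega
    have hjt : ((i : Int) + (c : Int)).toNat = i + c := by omega
    rw [List.range_succ, List.foldl_append]
    simp only [List.foldl_cons, List.foldl_nil, ← hF]
    simp only [pvStepA, hjt]
    have hmx : max F.2 (nums.getD (i + c) 0) = pvSegMax nums i (i + c) := by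
      rw [ih5]
      by_cases hc0 : c = 0
      · subst hc0
        simp [pvSegMax_self]
      · rw [if_neg hc0]
        have h1 : i + c = (i + c - 1) + 1 := by omega
        rw [h1, pvSegMax_snoc nums i (i + c - 1) (by omega)]
        congr 2
    have hacc1 : (pvAccA 0 nums).getD (i + c + 1) 0 = pvS nums (i + c + 1) := by
      rw [pvAccA_getD 0 nums _ (by omega)]; ring
    have hacc2 : (pvAccA 0 nums).getD i 0 = pvS nums i := by
      rw [pvAccA_getD 0 nums _ (by omega)]; ring
    have hv : max F.2 (nums.getD (i + c) 0) * ((↑(i + c) : Int) - (i : Int) + 1)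
        - ((pvAccA 0 nums).getD (i + c + 1) 0 - (pvAccA 0 nums).getD i 0) = pvG nums i (i + c) := by
      rw [hmx, hacc1, hacc2]
      simp only [pvG]
      try push_cast
      try ring
    refine ⟨?_, ?_, ?_, ?_, ?_⟩
    · rw [List.length_set]; exact ih1
    · rw [pv_getD_set_self _ _ _ _ (by rw [ih1]; omega), List.length_set]
      exact ih2
    · intro i' hne
      rw [pv_getD_set_ne _ _ _ _ _ (fun h => hne h.symm)]
      exact ih3 i' hne
    · intro j
      rw [pv_getD_set_self _ _ _ _ (by rw [ih1]; omega)]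
      by_cases hjj : j = i + c
      · subst hjj
        rw [pv_getD_set_self _ _ _ _ (by rw [ih2]; omega)]
        rw [hv, if_pos ⟨by omega, by omega⟩]
      · rw [pv_getD_set_ne _ _ _ _ _ (fun h => hjj h.symm), ih4 j]
        by_cases h1 : i ≤ j ∧ j < i + c
        · rw [if_pos h1, if_pos ⟨h1.1, by omega⟩]
        · rw [if_neg h1, if_neg (by omega)]
    · rw [if_neg (Nat.succ_ne_zero c)]
      have he : i + (c + 1) - 1 = i + c := by omega
      rw [he, hmx]

-- A's g table: rows i hold the group costs pvG i j for i ≤ j < n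
theorem pvGtable_inv (nums : List Int) :
    ∀ (c : Nat), c ≤ nums.length →
      let gres := (List.range c).foldl
        (fun (g : List (List Int)) (i : Nat) =>
          ((PySem.List.pyRange (i : Int) (nums.length : Int) 1).foldl
            (fun (p : List (List Int) × Int) jI =>
              let j := jI.toNat
              let mx := max p.2 (nums.getD j 0)
              (p.1.set i ((p.1.getD i []).set j
                  (mx * ((j : Int) - (i : Int) + 1) - ((pvAccA 0 nums).getD (j + 1) 0 - (pvAccA 0 nums).getD i 0))), mx))
            (g, nums.getD i 0)).1)
        (List.replicate nums.length (List.replicate nums.length (0 : Int)))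
      gres.length = nums.length
      ∧ (∀ i', c ≤ i' → i' < nums.length → gres.getD i' [] = List.replicate nums.length (0 : Int))
      ∧ (∀ i', i' < c → (gres.getD i' []).length = nums.length
            ∧ ∀ j, i' ≤ j → j < nums.length → (gres.getD i' []).getD j 0 = pvG nums i' j) := by
  intro c
  induction c with
  | zero =>
    intro _
    dsimp only
    simp only [List.range_zero, List.foldl_nil]
    refine ⟨by simp, fun i' _ hi' => ?_, fun i' h => absurd h (Nat.not_lt_zero i')⟩
    rw [List.getD_eq_getElem?_getD, List.getElem?_replicate_of_lt (by simpa using hi')]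
    rfl
  | succ c ih =>
    intro hc
    obtain ⟨ih1, ih2, ih3⟩ := ih (by omega)
    dsimp only at *
    rw [List.range_succ, List.foldl_append]
    simp only [List.foldl_cons, List.foldl_nil]
    set G0 := (List.range c).foldl
        (fun (g : List (List Int)) (i : Nat) =>
          ((PySem.List.pyRange (i : Int) (nums.length : Int) 1).foldl
            (fun (p : List (List Int) × Int) jI =>
              let j := jI.toNat
              let mx := max p.2 (nums.getD j 0)
              (p.1.set i ((p.1.getD i []).set j
                  (mx * ((j : Int) - (i : Int) + 1) - ((pvAccA 0 nums).getD (j + 1) 0 - (pvAccA 0 nums).getD i 0))), mx))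
            (g, nums.getD i 0)).1)
        (List.replicate nums.length (List.replicate nums.length (0 : Int))) with hG0
    have hcn : c < nums.length := by omega
    have hrowc : G0.getD c [] = List.replicate nums.length (0 : Int) := ih2 c (le_refl c) hcn
    have hconv : (PySem.List.pyRange (c : Int) (nums.length : Int) 1).foldl
            (fun (p : List (List Int) × Int) jI =>
              let j := jI.toNat
              let mx := max p.2 (nums.getD j 0)
              (p.1.set c ((p.1.getD c []).set j
                  (mx * ((j : Int) - (c : Int) + 1) - ((pvAccA 0 nums).getD (j + 1) 0 - (pvAccA 0 nums).getD c 0))), mx))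
            (G0, nums.getD c 0)
        = (List.range (nums.length - c)).foldl
            (fun (p : List (List Int) × Int) (k : Nat) => pvStepA nums (pvAccA 0 nums) c p ((c : Int) + (k : Int)))
            (G0, nums.getD c 0) := by
      rw [PySem.List.pyRange_one, List.foldl_map]
      have ht : ((nums.length : Int) - (c : Int)).toNat = nums.length - c := by omega
      rw [ht]
      rfl
    rw [hconv]
    obtain ⟨r1, r2, r3, r4, _⟩ := pvRow_inv nums c hcn (nums.length - c) (le_refl _) G0 ih1
      (by rw [hrowc, List.length_replicate])
    refine ⟨r1, ?_, ?_⟩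
    · intro i' hge hlt
      rw [r3 i' (by omega)]
      exact ih2 i' (by omega) hlt
    · intro i' hlt
      by_cases hic : i' = c
      · subst hic
        refine ⟨r2, fun j hj1 hj2 => ?_⟩
        rw [r4 j, if_pos ⟨hj1, by omega⟩]
      · have hlt' : i' < c := by omega
        obtain ⟨q1, q2⟩ := ih3 i' hlt'
        rw [r3 i' hic]
        exact ⟨q1, q2⟩

-- a loop writing only position i is a single set
theorem pv_foldl_set_min (h : Nat → Int) (l : List Nat) (lst : List Int) (i : Nat) :
    l.foldl (fun (l2 : List Int) ii => l2.set i (min (l2.getD i 0) (h ii))) lst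
      = lst.set i (l.foldl (fun v ii => min v (h ii)) (lst.getD i 0)) := by
  by_cases hlen : i < lst.length
  · induction l generalizing lst with
    | nil =>
      simp only [List.foldl_nil]
      rw [List.getD_eq_getElem?_getD, List.getElem?_eq_getElem hlen]
      simp
    | cons x xs ih =>
      simp only [List.foldl_cons]
      rw [ih (lst.set i (min (lst.getD i 0) (h x))) (by simpa using hlen)]
      rw [List.set_set]
      congr 1
      rw [List.getD_eq_getElem?_getD, List.getElem?_set_self hlen]
      rfl
  · rw [Nat.not_lt] at hlen
    have hset : ∀ a : Int, lst.set i a = lst := fun a => List.set_eq_of_length_le hlen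
    have hbody : ∀ (l2 : List Int), l2 = lst → l2.set i (min (l2.getD i 0) (h 0)) = lst := by
      intro l2 hl; rw [hl, hset]
    rw [hset]
    induction l generalizing lst with
    | nil => rfl
    | cons x xs ih =>
      simp only [List.foldl_cons]
      rw [hset]
      exact ih lst hlen hset hbody
  

-- a loop writing position i at step i leaves every slot a function of its old value
theorem pv_foldl_set_range (val : Nat → Int → Int) (c : Nat) (dp : List Int) (hc : c ≤ dp.length) :
    (((List.range c).foldl (fun (l : List Int) i => l.set i (val i (l.getD i 0))) dp).length = dp.length)
    ∧ (∀ m, ((List.range c).foldl (fun (l : List Int) i => l.set i (val i (l.getD i 0))) dp).getD m 0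
          = if m < c then val m (dp.getD m 0) else dp.getD m 0) := by
  induction c with
  | zero => simp
  | succ c ih =>
    obtain ⟨ihlen, ihget⟩ := ih (by omega)
    rw [List.range_succ, List.foldl_append]
    simp only [List.foldl_cons, List.foldl_nil]
    have hclen : c < dp.length := by omega
    refine ⟨?_, ?_⟩
    · rw [List.length_set, ihlen]
    · intro m
      by_cases hm : m = c
      · subst hm
        rw [List.getD_eq_getElem?_getD, List.getElem?_set_self (by rw [ihlen]; exact hclen)]
        simp only [Option.getD_some]
        rw [ihget m, if_neg (lt_irrefl m), if_pos (Nat.lt_succ_self m)]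
      · rw [List.getD_eq_getElem?_getD, List.getElem?_set_ne (fun h => hm h.symm),
            ← List.getD_eq_getElem?_getD, ihget m]
        by_cases h1 : m < c
        · rw [if_pos h1, if_pos (by omega)]
        · rw [if_neg h1, if_neg (by omega)]

-- ===== assembly =====

theorem pv_hpreB (nums : List Int) : ∀ m, m ≤ nums.length → (pvPreB 0 nums).getD m 0 = pvS nums m := by
  intro m hm
  rw [pvPreB_eq_pvAccA, pvAccA_getD 0 nums m hm]
  ring

-- one outer dp iteration realises one step of the recurrence pvFA
theorem pv_dp_one (nums : List Int) (g : List (List Int))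
    (hg : ∀ s j, s ≤ j → j < nums.length → (g.getD s []).getD j 0 = pvG nums s j)
    (dp : List Int) (t : Nat) (hlen : dp.length = nums.length)
    (hdp : ∀ i, i < nums.length → dp.getD i 0 = pvFA nums t i) :
    (((List.range nums.length).foldl (fun (new : List Int) (i : Nat) =>
        (List.range i).foldl (fun (new : List Int) (ii : Nat) =>
          new.set i (min (new.getD i 0) (dp.getD ii 0 + (g.getD (ii + 1) []).getD i 0))) new) dp).length
      = nums.length)
    ∧ (∀ i, i < nums.length →
        ((List.range nums.length).foldl (fun (new : List Int) (i : Nat) =>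
          (List.range i).foldl (fun (new : List Int) (ii : Nat) =>
            new.set i (min (new.getD i 0) (dp.getD ii 0 + (g.getD (ii + 1) []).getD i 0))) new) dp).getD i 0
          = pvFA nums (t + 1) i) := by
  have hbody : ∀ (new : List Int), ∀ (i : Nat),
      (List.range i).foldl (fun (new : List Int) (ii : Nat) =>
        new.set i (min (new.getD i 0) (dp.getD ii 0 + (g.getD (ii + 1) []).getD i 0))) new
      = new.set i ((List.range i).foldl
          (fun v ii => min v (dp.getD ii 0 + (g.getD (ii + 1) []).getD i 0)) (new.getD i 0)) := by
    intro new i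
    exact pv_foldl_set_min (fun ii => dp.getD ii 0 + (g.getD (ii + 1) []).getD i 0) (List.range i) new i
  rw [PySem.List.foldl_congr_mem (List.range nums.length) _
      (fun (new : List Int) (i : Nat) => new.set i
        ((fun (i : Nat) (v0 : Int) => (List.range i).foldl
          (fun v ii => min v (dp.getD ii 0 + (g.getD (ii + 1) []).getD i 0)) v0) i (new.getD i 0)))
      dp (fun acc x _ => hbody acc x)]
  obtain ⟨l1, l2⟩ := pv_foldl_set_range
    (fun (i : Nat) (v0 : Int) => (List.range i).foldl
      (fun v ii => min v (dp.getD ii 0 + (g.getD (ii + 1) []).getD i 0)) v0)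
    nums.length dp (by omega)
  refine ⟨by rw [l1, hlen], ?_⟩
  intro i hi
  rw [l2 i, if_pos hi, hdp i hi]
  rw [PySem.List.foldl_congr_mem (List.range i) _
      (fun v ii => min v (pvFA nums t ii + pvG nums (ii + 1) i)) (pvFA nums t i) ?_]
  · rfl
  · intro acc ii hii
    have hii' : ii < i := List.mem_range.mp hii
    rw [hdp ii (by omega), hg (ii + 1) i (by omega) hi]

-- the k-fold outer loop computes pvFA layer by layer
theorem pv_dp_iter (nums : List Int) (g : List (List Int))
    (hg : ∀ s j, s ≤ j → j < nums.length → (g.getD s []).getD j 0 = pvG nums s j) :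
    ∀ (L : List Int) (dp : List Int) (t : Nat), dp.length = nums.length →
      (∀ i, i < nums.length → dp.getD i 0 = pvFA nums t i) →
      ((L.foldl (fun dp _ =>
          (List.range nums.length).foldl (fun (new : List Int) (i : Nat) =>
            (List.range i).foldl (fun (new : List Int) (ii : Nat) =>
              new.set i (min (new.getD i 0) (dp.getD ii 0 + (g.getD (ii + 1) []).getD i 0))) new) dp) dp).length
        = nums.length)
      ∧ (∀ i, i < nums.length →
          (L.foldl (fun dp _ =>
            (List.range nums.length).foldl (fun (new : List Int) (i : Nat) =>
              (List.range i).foldl (fun (new : List Int) (ii : Nat) =>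
                new.set i (min (new.getD i 0) (dp.getD ii 0 + (g.getD (ii + 1) []).getD i 0))) new) dp) dp).getD i 0
            = pvFA nums (t + L.length) i) := by
  intro L
  induction L with
  | nil =>
    intro dp t h1 h2
    exact ⟨h1, by simpa using h2⟩
  | cons x xs ih =>
    intro dp t h1 h2
    obtain ⟨o1, o2⟩ := pv_dp_one nums g hg dp t h1 h2
    simp only [List.foldl_cons]
    obtain ⟨r1, r2⟩ := ih _ (t + 1) o1 o2
    refine ⟨r1, fun i hi => ?_⟩
    rw [r2 i hi]
    congr 1
    simp [List.length_cons]
    omega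

theorem pvA_eq (nums : List Int) (k : Int) (h : nums ≠ []) :
    minSpaceWastedKResizing nums k = pvFA nums k.toNat (nums.length - 1) := by
  have hn : 0 < nums.length := List.length_pos_of_ne_nil h
  obtain ⟨t1, t2, t3⟩ := pvGtable_inv nums nums.length le_rfl
  unfold minSpaceWastedKResizing
  dsimp only at t1 t2 t3 ⊢
  set Gt := (List.range nums.length).foldl
      (fun (g : List (List Int)) (i : Nat) =>
        ((PySem.List.pyRange (i : Int) (nums.length : Int) 1).foldl
          (fun (p : List (List Int) × Int) jI =>
            let j := jI.toNat
            let mx := max p.2 (nums.getD j 0)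
            (p.1.set i ((p.1.getD i []).set j
                (mx * ((j : Int) - (i : Int) + 1) - ((pvAccA 0 nums).getD (j + 1) 0 - (pvAccA 0 nums).getD i 0))), mx))
          (g, nums.getD i 0)).1)
      (List.replicate nums.length (List.replicate nums.length (0 : Int))) with hGt
  have hg : ∀ s j, s ≤ j → j < nums.length → (Gt.getD s []).getD j 0 = pvG nums s j := by
    intro s j hsj hj
    exact (t3 s (by omega)).2 j hsj hj
  have hdp0len : (Gt.getD 0 []).length = nums.length := (t3 0 hn).1
  have hdp0 : ∀ i, i < nums.length → (Gt.getD 0 []).getD i 0 = pvFA nums 0 i := by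
    intro i hi
    rw [(t3 0 hn).2 i (Nat.zero_le i) hi]
    rfl
  obtain ⟨f1, f2⟩ := pv_dp_iter nums Gt hg (PySem.List.pyRange 1 (k + 1) 1) (Gt.getD 0 []) 0 hdp0len hdp0
  have hL : (PySem.List.pyRange 1 (k + 1) 1).length = k.toNat := by
    rw [PySem.List.length_pyRange_one]
    omega
  have hfin : nums.length - 1 < nums.length := by omega
  set DPT := (PySem.List.pyRange 1 (k + 1) 1).foldl (fun dp _ =>
      (List.range nums.length).foldl (fun (new : List Int) (i : Nat) =>
        (List.range i).foldl (fun (new : List Int) (ii : Nat) =>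
          new.set i (min (new.getD i 0) (dp.getD ii 0 + (Gt.getD (ii + 1) []).getD i 0))) new) dp)
      (Gt.getD 0 []) with hDPT
  have hl : DPT.length ≠ 0 := by rw [f1]; omega
  have hpg : (PySem.List.pyGet? DPT (-1)).getD 0 = DPT.getD (DPT.length - 1) 0 := by
    simp only [PySem.List.pyGet?, PySem.List.pyIdx?, List.getD_eq_getElem?_getD]
    rw [if_neg (by norm_num), if_pos (by omega)]
    simp
  rw [hpg, f1, f2 (nums.length - 1) hfin, hL]
  norm_num

-- ===== VERDICT (by name: the statement is the Claim_ definition above) =====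
theorem minSpaceWastedKResizing_spec : Claim_equal_minSpaceWastedKResizing := by
  intro nums k _ hne
  unfold Spec_minSpaceWastedKResizing
  have hn : 0 < nums.length := List.length_pos_of_ne_nil hne
  have hB : minSpaceWastedKResizing_alt nums k
      = pvDfsB nums (pvPreB 0 nums) (nums.length - 1) (min k ((nums.length : Int) - 1)).toNat := rfl
  have hpre := pv_hpreB nums
  have hfin : nums.length - 1 < nums.length := by omega
  rw [pvA_eq nums k hne, hB,
      pvFA_eq_pvDfsB nums (pvPreB 0 nums) hpre k.toNat (nums.length - 1) hfin]
  by_cases hT : k.toNat ≤ nums.length - 1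
  · have hR : (min k ((nums.length : Int) - 1)).toNat = k.toNat := by omega
    rw [hR]
  · have hR : (min k ((nums.length : Int) - 1)).toNat = nums.length - 1 := by omega
    rw [hR, pvDfsB_stab nums (pvPreB 0 nums) hpre (nums.length - 1) hfin k.toNat (by omega)]
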